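-- pv_equiv track=rewrite | github.com/Daniel1998-coder/Met_inz_wiedzy | 2.py | decyzja
-- ===== SOURCE A (Python) =====
-- def decyzja(slownik):
--     klucze = list(slownik.keys())
--     ilosc = 1
--     klasa = klucze[0]
--     minimum = slownik[klucze[0]]
--     for key in klucze[1:]:
--         if minimum > slownik[key]:
--             minimum = slownik[key]
--             klasa = key
--             ilosc = 1
--         elif minimum == slownik[key]:
--             ilosc += 1
--     if ilosc > 1:
--         return
--     return klasa
-- ===== SOURCE B (Python) =====
-- def decyzja(slownik):
--     wartosci = list(slownik.values())
--     minimum = min(wartosci)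
--     if wartosci.count(minimum) > 1:
--         return None
--     for klucz, wartosc in slownik.items():
--         if wartosc == minimum:
--             return klucz
-- ===== Notes on version B (the rewrite author's own statement) =====
-- stated objective: simpler
-- what changed: Replaces the single running-minimum/count/key state machine by two direct passes: min() over the values plus a count of that minimum, then the first key attaining it; no per-step state juggling.
-- outside the precondition, e.g. on decyzja({}): A raises IndexError, B raises ValueError
import Mathlib
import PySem

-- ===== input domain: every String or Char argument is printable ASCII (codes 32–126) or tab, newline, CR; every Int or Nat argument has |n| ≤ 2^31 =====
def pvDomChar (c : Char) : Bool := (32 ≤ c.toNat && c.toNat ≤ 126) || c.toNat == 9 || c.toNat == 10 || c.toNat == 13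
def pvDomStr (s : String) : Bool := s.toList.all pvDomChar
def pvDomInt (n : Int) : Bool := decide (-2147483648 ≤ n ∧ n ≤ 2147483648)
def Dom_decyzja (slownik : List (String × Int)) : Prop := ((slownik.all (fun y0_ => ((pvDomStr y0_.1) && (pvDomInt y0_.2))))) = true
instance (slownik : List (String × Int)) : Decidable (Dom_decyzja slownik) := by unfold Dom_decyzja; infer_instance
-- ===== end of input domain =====

-- B replaces A's running-minimum state machine by two direct passes (min of the values,
-- count of that minimum, first key attaining it); objective: simpler.

-- ===== PORT A =====
-- slownik[key]: first-match lookup; the default 0 is never reached because every key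
-- iterated comes from slownik itself (KeyError is impossible in A).
def pvLookup (slownik : List (String × Int)) (k : String) : Int :=
  match slownik.find? (fun p => p.1 == k) with
  | some p => p.2
  | none => 0

def decyzja (slownik : List (String × Int)) : Option String :=
  let klucze := slownik.map (·.1)
  match klucze with
  | [] => none   -- klucze[0] raises IndexError here; excluded by Pre_decyzja
  | k0 :: rest =>
    -- state (minimum, klasa, ilosc), exactly A's three loop variables
    let fin := rest.foldl (fun (st : Int × String × Int) key =>
        if st.1 > pvLookup slownik key then (pvLookup slownik key, key, 1)
        else if st.1 == pvLookup slownik key then (st.1, st.2.1, st.2.2 + 1)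
        else st)
      (pvLookup slownik k0, k0, 1)
    if fin.2.2 > 1 then none else some fin.2.1

-- ===== PORT B =====
def decyzja_alt (slownik : List (String × Int)) : Option String :=
  let wartosci := slownik.map (·.2)
  match PySem.List.min? wartosci (fun y => y) with
  | none => none   -- min([]) raises ValueError here; excluded by Pre_decyzja
  | some m =>
    if PySem.List.count wartosci m > 1 then none
    else (slownik.find? (fun p => p.2 == m)).map (·.1)

-- ===== PRECONDITION & SPEC =====
-- Pre_ excludes the empty dict (A raises IndexError, B raises ValueError) and association
-- lists with duplicate keys, which do not encode any Python dict.
def Pre_decyzja (slownik : List (String × Int)) : Prop :=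
  slownik ≠ [] ∧ (slownik.map (·.1)).Nodup
instance (slownik : List (String × Int)) : Decidable (Pre_decyzja slownik) := by
  unfold Pre_decyzja; infer_instance

def pvWitness_decyzja : (List (String × Int)) := [("a", 3), ("b", 1), ("c", 2)]

def Spec_decyzja (slownik : List (String × Int)) (out : Option String) : Prop := out = decyzja_alt slownik
instance (slownik : List (String × Int)) (out : Option String) : Decidable (Spec_decyzja slownik out) := by unfold Spec_decyzja; infer_instance

-- ===== CLAIM (what is proved, stated in full; the proofs are below) =====
def Claim_equal_decyzja : Prop := ∀ (slownik : List (String × Int)), Dom_decyzja slownik → Pre_decyzja slownik → Spec_decyzja slownik (decyzja slownik)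

-- ===== LEMMAS AND PROOFS =====

-- the pair-level step A performs once lookups are resolved
def pvStep (st : Int × String × Int) (p : String × Int) : Int × String × Int :=
  if st.1 > p.2 then (p.2, p.1, 1)
  else if st.1 == p.2 then (st.1, st.2.1, st.2.2 + 1)
  else st

theorem pvLookup_eq {slownik : List (String × Int)} {k : String} {v : Int}
    (hnd : (slownik.map (·.1)).Nodup) (hm : (k, v) ∈ slownik) :
    pvLookup slownik k = v := by
  induction slownik with
  | nil => cases hm
  | cons q t ih =>
    simp only [List.map_cons, List.nodup_cons] at hnd
    rcases List.mem_cons.mp hm with h | h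
    · subst h; simp [pvLookup]
    · have hne : q.1 ≠ k := by
        intro he
        exact hnd.1 (by simpa [he] using List.mem_map_of_mem (f := (·.1)) h)
      have := ih hnd.2 h
      simpa [pvLookup, hne] using this

theorem pv_foldl_min_le (l : List Int) (m : Int) : l.foldl min m ≤ m := by
  induction l generalizing m with
  | nil => simp
  | cons v t ih => exact le_trans (ih (min m v)) (min_le_left _ _)

theorem pv_foldl_min_mem (l : List Int) (m : Int) :
    l.foldl min m = m ∨ l.foldl min m ∈ l := by
  induction l generalizing m with
  | nil => simp
  | cons v t ih =>
    rcases ih (min m v) with h | h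
    · rcases min_cases m v with ⟨he, _⟩ | ⟨he, _⟩
      · left; rw [List.foldl_cons, h, he]
      · right; rw [List.foldl_cons, h, he]; exact List.mem_cons_self
    · right; exact List.mem_cons_of_mem _ h

-- the loop invariant: folding pvStep computes (global min, chosen key, count of the min)
theorem pv_inv (l : List (String × Int)) (m : Int) (kl : String) (c : Int) :
    l.foldl pvStep (m, kl, c) =
      ( (l.map (·.2)).foldl min m,
        (if (l.map (·.2)).foldl min m < m then
            ((l.find? (fun p => p.2 == (l.map (·.2)).foldl min m)).map (·.1)).getD kl
         else kl),
        (if (l.map (·.2)).foldl min m < m then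
            ((l.map (·.2)).count ((l.map (·.2)).foldl min m) : Int)
         else c + ((l.map (·.2)).count m : Int)) ) := by
  induction l generalizing m kl c with
  | nil => simp
  | cons q t ih =>
    obtain ⟨k, v⟩ := q
    simp only [List.map_cons, List.foldl_cons]
    by_cases h1 : m > v
    · have hmv : min m v = v := by omega
      have hstep : pvStep (m, kl, c) (k, v) = (v, k, 1) := by simp [pvStep, h1]
      rw [hstep, ih]
      have hMle : (t.map (·.2)).foldl min v ≤ v := pv_foldl_min_le _ _
      by_cases h2 : (t.map (·.2)).foldl min v < v
      · -- min is attained strictly inside t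
        have hmem : (t.map (·.2)).foldl min v ∈ t.map (·.2) := by
          rcases pv_foldl_min_mem (t.map (·.2)) v with he | he
          · omega
          · exact he
        obtain ⟨p, hp, hpv⟩ := List.mem_map.mp hmem
        have hfind : (t.find? (fun p' => p'.2 == (t.map (·.2)).foldl min v)).isSome := by
          rw [List.find?_isSome]
          exact ⟨p, hp, by simp [hpv]⟩
        obtain ⟨p', hp'⟩ := Option.isSome_iff_exists.mp hfind
        have hvne : ¬ (v == (t.map (·.2)).foldl min v) = true := by simp; omega
        simp only [hmv, List.find?_cons, hvne]
        simp [h2, hp', show (t.map (·.2)).foldl min v < m by omega,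
          show ¬ v = (t.map (·.2)).foldl min v by omega]
      · have heq : (t.map (·.2)).foldl min v = v := le_antisymm hMle (by omega)
        simp [hmv, heq, h1]
        omega
    · by_cases h2 : m = v
      · have hmv : min m v = m := by omega
        have hstep : pvStep (m, kl, c) (k, v) = (m, kl, c + 1) := by
          simp [pvStep, h2]
        rw [hstep, ih]
        have hMle : (t.map (·.2)).foldl min m ≤ m := pv_foldl_min_le _ _
        by_cases h3 : (t.map (·.2)).foldl min m < m
        · have hvne : ¬ (v == (t.map (·.2)).foldl min m) = true := by simp; omega
          simp only [hmv, List.find?_cons, hvne]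
          simp [h3, List.count_cons, show ¬ v = (t.map (·.2)).foldl min m by omega]
        · subst h2
          simp [min_self, h3]
          omega
      · have h4 : m < v := by omega
        have hmv : min m v = m := by omega
        have hstep : pvStep (m, kl, c) (k, v) = (m, kl, c) := by
          simp [pvStep, h1]; omega
        rw [hstep, ih]
        have hMle : (t.map (·.2)).foldl min m ≤ m := pv_foldl_min_le _ _
        by_cases h3 : (t.map (·.2)).foldl min m < m
        · have hvne : ¬ (v == (t.map (·.2)).foldl min m) = true := by simp; omega
          simp only [hmv, List.find?_cons, hvne]
          simp [h3, List.count_cons, show ¬ v = (t.map (·.2)).foldl min m by omega]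
        · simp [hmv, h3, show ¬ v = m by omega]

-- ===== VERDICT (by name: the statement is the Claim_ definition above) =====
theorem decyzja_spec : Claim_equal_decyzja := by
  intro slownik _hdom hpre
  obtain ⟨hne, hnd⟩ := hpre
  unfold Spec_decyzja
  obtain ⟨⟨k0, v0⟩, rest, rfl⟩ : ∃ q t, slownik = q :: t := by
    cases slownik with
    | nil => exact absurd rfl hne
    | cons q t => exact ⟨q, t, rfl⟩
  have hl0 : pvLookup ((k0, v0) :: rest) k0 = v0 := by simp [pvLookup]
  have hfold : (rest.map (·.1)).foldl
      (fun (st : Int × String × Int) key =>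
        if st.1 > pvLookup ((k0, v0) :: rest) key then (pvLookup ((k0, v0) :: rest) key, key, 1)
        else if st.1 == pvLookup ((k0, v0) :: rest) key then (st.1, st.2.1, st.2.2 + 1)
        else st)
      (pvLookup ((k0, v0) :: rest) k0, k0, 1)
    = rest.foldl pvStep (v0, k0, 1) := by
    rw [hl0, List.foldl_map]
    apply PySem.List.foldl_congr_mem
    intro st p hp
    have hv : pvLookup ((k0, v0) :: rest) p.1 = p.2 :=
      pvLookup_eq hnd (by simpa using List.mem_cons_of_mem _ hp)
    simp [pvStep, hv]
  have hmin : PySem.List.min? (v0 :: rest.map (·.2)) (fun y => y)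
      = some ((rest.map (·.2)).foldl min v0) := by
    simp [PySem.List.min?_id_cons]
  unfold decyzja decyzja_alt
  simp only [List.map_cons, hmin, hfold, pv_inv]
  have hMle : (rest.map (·.2)).foldl min v0 ≤ v0 := pv_foldl_min_le _ _
  by_cases hlt : (rest.map (·.2)).foldl min v0 < v0
  · -- the minimum is strictly below the first value, hence attained inside rest
    have hmem : (rest.map (·.2)).foldl min v0 ∈ rest.map (·.2) := by
      rcases pv_foldl_min_mem (rest.map (·.2)) v0 with he | he
      · omega
      · exact he
    obtain ⟨p, hp, hpv⟩ := List.mem_map.mp hmem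
    have hfind : (rest.find? (fun p' => p'.2 == (rest.map (·.2)).foldl min v0)).isSome := by
      rw [List.find?_isSome]
      exact ⟨p, hp, by simp [hpv]⟩
    obtain ⟨p', hp'⟩ := Option.isSome_iff_exists.mp hfind
    have hvne : (v0 == (rest.map (·.2)).foldl min v0) = false := by simp; omega
    simp only [List.find?_cons, hvne, PySem.List.count_eq, List.count_cons]
    simp [hlt, hp']
  · have heq : (rest.map (·.2)).foldl min v0 = v0 := le_antisymm hMle (by omega)
    simp only [heq, PySem.List.count_eq, List.count_cons]
    simp only [lt_irrefl, if_false, beq_self_eq_true, if_true]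
    by_cases hc : List.count v0 (List.map (fun x => x.2) rest) = 0
    · simp [hc]
    · have hpos : 0 < List.count v0 (List.map (fun x => x.2) rest) := Nat.pos_of_ne_zero hc
      have h1' : (1 : Int) + (List.count v0 (List.map (fun x => x.2) rest) : Int) > 1 := by omega
      have h2' : List.count v0 (List.map (fun x => x.2) rest) + 1 > 1 := by omega
      simp [h1', h2']
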